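-- pv_equiv track=rewrite | github.com/aaniksahaa/CSE-316-Microprocessors-Microcontrollers-and-Embedded-Systems-Sessional | Experiment 2 - LED Matrix/Python Codebase/LED Matrix Simulator/led-autocoder.py | get_rev_bin
-- ===== SOURCE A (Python) =====
-- def get_rev_bin(hex):
--     b = bin(int(hex[:2],16))[2:]
--
--     while(len(b) < 8):
--         b = "0" + b
--
--     r = ""
--     for c in b:
--         if(c == '0'):
--             r += '1'
--         else:
--             r += '0'
--
--     return "0b" + r
-- ===== SOURCE B (Python) =====
-- def get_rev_bin(hex):
--     return "0b" + format(0xFF ^ int(hex[:2], 16), "08b")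
-- ===== Notes on version B (the rewrite author's own statement) =====
-- stated objective: idiomatic
-- what changed: Replaced the zero-padding while-loop and the character-by-character inversion for-loop with a single arithmetic 8-bit complement (0xFF XOR value) rendered by zero-padded binary format.
-- outside the precondition, e.g. on get_rev_bin('-1'): A returns '0b11111100', B returns '0b-100000000'
import Mathlib
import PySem

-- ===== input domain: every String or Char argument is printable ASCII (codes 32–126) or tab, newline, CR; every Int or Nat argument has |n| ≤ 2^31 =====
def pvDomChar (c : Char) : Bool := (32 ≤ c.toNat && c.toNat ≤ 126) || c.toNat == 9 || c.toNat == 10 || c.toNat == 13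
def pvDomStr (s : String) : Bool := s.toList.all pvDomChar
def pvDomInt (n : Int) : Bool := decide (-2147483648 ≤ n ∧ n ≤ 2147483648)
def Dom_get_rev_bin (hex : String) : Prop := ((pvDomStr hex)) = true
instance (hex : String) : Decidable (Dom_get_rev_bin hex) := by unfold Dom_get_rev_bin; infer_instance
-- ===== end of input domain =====

-- B replaces A's zero-padding while-loop and char-by-char inversion for-loop with one
-- arithmetic 8-bit complement (0xFF XOR v) printed as zero-padded binary (idiomatic, same cost).

-- ===== PORT A =====
-- while(len(b) < 8): b = "0" + b
def pvPadA : Nat → List Char → List Char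
  | 0, cs => cs
  | n + 1, cs => if cs.length < 8 then pvPadA n ('0' :: cs) else cs

def get_rev_bin (hex : String) : String :=
  match PySem.Int.ofCharsBase? (PySem.List.slice hex.toList none (some 2)) 16 with
  | none => ""          -- Python raises ValueError here; excluded by Pre_
  | some v =>
    let b := pvPadA 8 ((PySem.Int.toBinChars0b v).drop 2)
    let r := b.foldl (fun r c => r ++ [if c == '0' then '1' else '0']) []
    String.ofList ('0' :: 'b' :: r)

-- ===== PORT B =====
def get_rev_bin_alt (hex : String) : String :=
  match PySem.Int.ofCharsBase? (PySem.List.slice hex.toList none (some 2)) 16 with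
  | none => ""          -- Python raises ValueError here; excluded by Pre_
  | some v =>
    let s := PySem.Int.toBinChars (PySem.Int.bxor 255 v)   -- format(0xFF ^ v, "b")
    String.ofList ('0' :: 'b' :: (List.replicate (8 - s.length) '0' ++ s))  -- "08b" zero pad

-- ===== PRECONDITION & SPEC =====
-- Pre_ excludes inputs whose first two characters fail to parse as base-16 (A raises
-- ValueError) and those that parse to a NEGATIVE value (a signed "hex byte" is outside the
-- function's purpose; A's value there mixes the letter of the bin() prefix into the inverted string, an
-- artefact of its implementation, and B's sign-prefixed value is equally accidental).
-- The conjunct v ≤ 255 holds automatically for any two base-16 characters and excludes nothing.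
def Pre_get_rev_bin (hex : String) : Prop :=
  0 ≤ (PySem.Int.ofCharsBase? (PySem.List.slice hex.toList none (some 2)) 16).getD (-1) ∧
  (PySem.Int.ofCharsBase? (PySem.List.slice hex.toList none (some 2)) 16).getD (-1) ≤ 255
instance (hex : String) : Decidable (Pre_get_rev_bin hex) := by unfold Pre_get_rev_bin; infer_instance

def pvWitness_get_rev_bin : String := "7F"

def Spec_get_rev_bin (hex : String) (out : String) : Prop := out = get_rev_bin_alt hex
instance (hex : String) (out : String) : Decidable (Spec_get_rev_bin hex out) := by unfold Spec_get_rev_bin; infer_instance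

-- ===== CLAIM (what is proved, stated in full; the proofs are below) =====
def Claim_equal_get_rev_bin : Prop := ∀ (hex : String), Dom_get_rev_bin hex → Pre_get_rev_bin hex → Spec_get_rev_bin hex (get_rev_bin hex)

-- ===== LEMMAS AND PROOFS =====

-- the two bodies agree on every byte value 0..255 (checked by kernel evaluation)
lemma pv_key : ∀ n : Nat, n < 256 →
    (let b := pvPadA 8 ((PySem.Int.toBinChars0b (n : Int)).drop 2)
     b.foldl (fun r c => r ++ [if c == '0' then '1' else '0']) [])
    = (let s := PySem.Int.toBinChars (PySem.Int.bxor 255 (n : Int))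
       List.replicate (8 - s.length) '0' ++ s) := by
  set_option maxRecDepth 4000 in decide

-- ===== VERDICT (by name: the statement is the Claim_ definition above) =====
theorem get_rev_bin_spec : Claim_equal_get_rev_bin := by
  intro hex _ hpre
  unfold Spec_get_rev_bin get_rev_bin get_rev_bin_alt
  unfold Pre_get_rev_bin at hpre
  rcases h : PySem.Int.ofCharsBase? (PySem.List.slice hex.toList none (some 2)) 16 with _ | v
  · simp [h] at hpre
  · rw [h] at hpre
    simp only [Option.getD_some] at hpre
    obtain ⟨h0, h255⟩ := hpre
    obtain ⟨n, rfl⟩ := Int.eq_ofNat_of_zero_le h0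
    have hn : n < 256 := by exact_mod_cast Int.lt_add_one_iff.mpr h255
    simp only
    rw [pv_key n hn]
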